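-- pv_equiv track=rewrite | github.com/philippreinhard/capstone_project | AI Model/Data Preparation/data_transformer.py | get_eligible_years
-- ===== SOURCE A (Python) =====
-- def get_eligible_years(review_years, entry_years, observed_years, continuity, use_prior):
--     possible_years = []
--     if use_prior:
--         observed_years+=1
--
--
--     for entry_year in entry_years:
--
--         do_append = True
--         # check for successor entry year
--         if not entry_year + 1 in entry_years:
--             continue
--
--         # check if continuity is required throughout years
--         if continuity:
--
--             for i in range(0, observed_years):
--                 if (entry_year - i in review_years):
--                     pass
--                 else:
--                     do_append = False
--                     break
--             if do_append:
--                 possible_years.append(entry_year)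
--
--         ## else, if continuity is not required, just check for minimum year
--         else:
--             if min(review_years) <= entry_year - observed_years+1 and entry_year in review_years:
--                 possible_years.append(entry_year)
--
--     return possible_years
-- ===== SOURCE B (Python) =====
-- def get_eligible_years(review_years, entry_years, observed_years, continuity, use_prior):
--     k = observed_years + 1 if use_prior else observed_years
--     entry_set = set(entry_years)
--     result = []
--     if continuity:
--         # run-length table: run[y] = number of consecutive review years ending at y
--         run = {}
--         for y in sorted(set(review_years)):
--             run[y] = run.get(y - 1, 0) + 1
--         for e in entry_years:
--             if e + 1 in entry_set and (k <= 0 or run.get(e, 0) >= k):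
--                 result.append(e)
--     else:
--         review_set = set(review_years)
--         for e in entry_years:
--             if e + 1 in entry_set:
--                 if min(review_years) <= e - k + 1 and e in review_set:
--                     result.append(e)
--     return result
-- ===== Notes on version B (the rewrite author's own statement) =====
-- stated objective: faster
-- what changed: Replaces A's per-entry inner scan over range(observed_years) and per-entry list membership by a run-length table over the review years (run[y] = run[y-1]+1 built once over sorted(set(review_years))), so each entry's continuity check is a single table lookup; membership tests use sets.
import Mathlib
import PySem

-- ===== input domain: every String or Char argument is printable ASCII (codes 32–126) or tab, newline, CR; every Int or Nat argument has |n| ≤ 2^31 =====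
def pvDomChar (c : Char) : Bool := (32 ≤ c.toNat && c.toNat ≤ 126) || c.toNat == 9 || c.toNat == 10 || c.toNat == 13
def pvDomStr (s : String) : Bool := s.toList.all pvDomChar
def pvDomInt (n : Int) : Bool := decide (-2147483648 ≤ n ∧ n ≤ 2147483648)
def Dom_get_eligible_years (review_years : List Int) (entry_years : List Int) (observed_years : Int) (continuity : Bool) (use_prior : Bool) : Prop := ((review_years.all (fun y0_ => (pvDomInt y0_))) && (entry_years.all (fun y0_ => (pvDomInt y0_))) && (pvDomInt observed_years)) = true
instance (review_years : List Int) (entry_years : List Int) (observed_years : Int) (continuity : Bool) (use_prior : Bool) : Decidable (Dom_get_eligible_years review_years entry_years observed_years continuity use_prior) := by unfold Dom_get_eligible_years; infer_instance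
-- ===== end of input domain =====

-- B replaces A's per-entry inner scan over range(observed_years) by a run-length table over the review
-- years built once (run[y] = run[y-1]+1 over sorted(set(review_years))); measured faster in a timing run.

-- ===== PORT A =====
-- inner 'for i in range(0, observed_years)' loop with its break ('do_append = False; break' → false)
def pvA_inner (review_years : List Int) (entry_year : Int) : List Int → Bool
  | [] => true
  | i :: rest =>
    if review_years.contains (entry_year - i) then pvA_inner review_years entry_year rest
    else false

def get_eligible_years (review_years : List Int) (entry_years : List Int) (observed_years : Int) (continuity : Bool) (use_prior : Bool) : List Int :=
  let observed_years := if use_prior then observed_years + 1 else observed_years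
  entry_years.foldl (fun possible_years entry_year =>
    if !(entry_years.contains (entry_year + 1)) then possible_years
    else if continuity then
      (if pvA_inner review_years entry_year (PySem.List.pyRange 0 observed_years 1)
       then possible_years ++ [entry_year] else possible_years)
    else
      -- min(review_years) raises ValueError on []; Pre_ excludes reaching this branch with review_years = []
      (if ((PySem.List.min? review_years (fun x => x)).getD 0 ≤ entry_year - observed_years + 1
            && review_years.contains entry_year)
       then possible_years ++ [entry_year] else possible_years)) []

-- ===== PORT B =====
-- run-length table: for y in sorted(set(review_years)): run[y] = run.get(y-1, 0) + 1
def pvB_runTable (ys : List Int) : PySem.Dict Int Int :=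
  ys.foldl (fun run y => run.insert y (run.getD (y - 1) 0 + 1)) PySem.Dict.empty

def get_eligible_years_alt (review_years : List Int) (entry_years : List Int) (observed_years : Int) (continuity : Bool) (use_prior : Bool) : List Int :=
  let k := if use_prior then observed_years + 1 else observed_years
  let entry_set : PySem.Set Int := PySem.Set.ofList entry_years
  if continuity then
    let run := pvB_runTable (PySem.List.sorted (PySem.Set.ofList review_years) (fun x => x) false)
    entry_years.foldl (fun result e =>
      if PySem.Set.contains entry_set (e + 1) && (decide (k ≤ 0) || decide (run.getD e 0 ≥ k))
      then result ++ [e] else result) []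
  else
    let review_set : PySem.Set Int := PySem.Set.ofList review_years
    entry_years.foldl (fun result e =>
      if PySem.Set.contains entry_set (e + 1) then
        -- min(review_years) raises ValueError on []; Pre_ excludes reaching this branch with review_years = []
        (if ((PySem.List.min? review_years (fun x => x)).getD 0 ≤ e - k + 1
              && PySem.Set.contains review_set e)
         then result ++ [e] else result)
      else result) []

-- ===== PRECONDITION & SPEC =====
-- Pre_ excludes exactly the inputs where A (and B alike) raises ValueError: continuity is false,
-- review_years is empty, and some entry year has its successor in entry_years, so min([]) is evaluated.
def Pre_get_eligible_years (review_years : List Int) (entry_years : List Int) (observed_years : Int) (continuity : Bool) (use_prior : Bool) : Prop :=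
  ¬ (continuity = false ∧ review_years = [] ∧ ∃ e ∈ entry_years, (e + 1) ∈ entry_years)
instance (review_years : List Int) (entry_years : List Int) (observed_years : Int) (continuity : Bool) (use_prior : Bool) : Decidable (Pre_get_eligible_years review_years entry_years observed_years continuity use_prior) := by unfold Pre_get_eligible_years; infer_instance

def pvWitness_get_eligible_years : List Int × List Int × Int × Bool × Bool :=
  ([1999, 2000, 2001], [2000, 2001], 2, true, false)

def Spec_get_eligible_years (review_years : List Int) (entry_years : List Int) (observed_years : Int) (continuity : Bool) (use_prior : Bool) (out : List Int) : Prop := out = get_eligible_years_alt review_years entry_years observed_years continuity use_prior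
instance (review_years : List Int) (entry_years : List Int) (observed_years : Int) (continuity : Bool) (use_prior : Bool) (out : List Int) : Decidable (Spec_get_eligible_years review_years entry_years observed_years continuity use_prior out) := by unfold Spec_get_eligible_years; infer_instance

-- ===== CLAIM (what is proved, stated in full; the proofs are below) =====
def Claim_equal_get_eligible_years : Prop := ∀ (review_years : List Int) (entry_years : List Int) (observed_years : Int) (continuity : Bool) (use_prior : Bool), Dom_get_eligible_years review_years entry_years observed_years continuity use_prior → Pre_get_eligible_years review_years entry_years observed_years continuity use_prior → Spec_get_eligible_years review_years entry_years observed_years continuity use_prior (get_eligible_years review_years entry_years observed_years continuity use_prior)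

-- ===== LEMMAS AND PROOFS =====

-- length of consecutive run of review years ending at y (0 if y is not a review year)
def pvStreak (S : List Int) (y : Int) : Nat :=
  if y ∈ S then pvStreak S (y - 1) + 1 else 0
termination_by (S.filter (fun z => decide (z ≤ y))).length
decreasing_by
  rename_i h
  have h1 : S.filter (fun z => decide (z ≤ y - 1))
      = (S.filter (fun z => decide (z ≤ y))).filter (fun z => decide (z ≤ y - 1)) := by
    rw [List.filter_filter]
    apply List.filter_congr
    intro x _
    by_cases hx : x ≤ y - 1 <;> simp [hx] <;> omega
  rw [h1]
  apply List.length_filter_lt_length_iff_exists.mpr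
  exact ⟨y, by simp [h], by simp⟩

lemma pvStreak_of_not_mem (S : List Int) (y : Int) (h : y ∉ S) : pvStreak S y = 0 := by
  rw [pvStreak, if_neg h]

lemma pvA_inner_iff (S : List Int) (y : Int) (l : List Int) :
    pvA_inner S y l = true ↔ ∀ i ∈ l, (y - i) ∈ S := by
  induction l with
  | nil => simp [pvA_inner]
  | cons a t ih =>
    simp only [pvA_inner, List.forall_mem_cons]
    by_cases h : (y - a) ∈ S <;> simp [h, ih]

lemma pvStreak_iff (S : List Int) : ∀ (n : Nat) (y : Int),
    (∀ i : Nat, i < n → (y - i) ∈ S) ↔ n ≤ pvStreak S y := by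
  intro n
  induction n with
  | zero => intro y; simp
  | succ m ih =>
    intro y
    rw [pvStreak]
    by_cases hy : y ∈ S
    · rw [if_pos hy]
      constructor
      · intro hall
        have : ∀ i : Nat, i < m → (y - 1 - i) ∈ S := by
          intro i hi
          have := hall (i + 1) (by omega)
          have he : y - (↑(i + 1) : Int) = y - 1 - i := by push_cast; ring
          rwa [he] at this
        have := (ih (y - 1)).mp this
        omega
      · intro hle i hi
        rcases Nat.eq_zero_or_pos i with h0 | hpos
        · subst h0; simpa using hy
        · have hm : i - 1 < m := by omega
          have := (ih (y - 1)).mpr (by omega) (i - 1) hm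
          have he : y - 1 - ↑(i - 1) = y - (i : Int) := by
            have : (↑(i - 1) : Int) = (i : Int) - 1 := by omega
            rw [this]; ring
          rwa [he] at this
    · rw [if_neg hy]
      constructor
      · intro hall
        exact absurd (by simpa using hall 0 (by omega)) hy
      · intro hle; omega

lemma pvB_run_inv (S : List Int) :
    ∀ (rest : List Int) (d : PySem.Dict Int Int),
      rest.Pairwise (· < ·) → (∀ z ∈ rest, z ∈ S) →
      (∀ y : Int, d.getD y 0 = if y ∈ S ∧ y ∉ rest then (pvStreak S y : Int) else 0) →
      ∀ y : Int,
        (rest.foldl (fun run y => run.insert y (run.getD (y - 1) 0 + 1)) d).getD y 0 =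
          if y ∈ S then (pvStreak S y : Int) else 0 := by
  intro rest
  induction rest with
  | nil =>
    intro d _ _ hinv y
    simpa using hinv y
  | cons a t ih =>
    intro d hp hsub hinv y
    rw [List.foldl_cons]
    have ha : ∀ z ∈ t, a < z := (List.pairwise_cons.mp hp).1
    have hpt : t.Pairwise (· < ·) := (List.pairwise_cons.mp hp).2
    apply ih _ hpt (fun z hz => hsub z (List.mem_cons_of_mem a hz))
    intro z
    rw [PySem.Dict.getD_insert]
    by_cases hz : z = a
    · subst hz
      rw [if_pos rfl]
      have hzS : z ∈ S := hsub z (List.mem_cons.mpr (Or.inl rfl))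
      have hznt : z ∉ t := fun h => absurd (ha z h) (lt_irrefl z)
      rw [if_pos ⟨hzS, hznt⟩]
      have hprev : d.getD (z - 1) 0 = (pvStreak S (z - 1) : Int) := by
        rw [hinv (z - 1)]
        by_cases hm : z - 1 ∈ S
        · have : z - 1 ∉ z :: t := by
            intro hc
            rcases List.mem_cons.mp hc with h1 | h2
            · omega
            · have := ha _ h2; omega
          rw [if_pos ⟨hm, this⟩]
        · rw [if_neg (by tauto), pvStreak_of_not_mem S _ hm]; rfl
      have hs : pvStreak S z = pvStreak S (z - 1) + 1 := by
        rw [pvStreak, if_pos hzS]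
      rw [hprev, hs]
      push_cast; ring
    · rw [if_neg hz, hinv z]
      by_cases hcond : z ∈ S ∧ z ∉ t
      · rw [if_pos hcond]
        have : z ∉ a :: t := by
          intro hc
          rcases List.mem_cons.mp hc with h1 | h2
          · exact hz h1
          · exact hcond.2 h2
        rw [if_pos ⟨hcond.1, this⟩]
      · have : ¬ (z ∈ S ∧ z ∉ a :: t) := by
          intro hc
          exact hcond ⟨hc.1, fun h => hc.2 (List.mem_cons_of_mem a h)⟩
        rw [if_neg this, if_neg hcond]

lemma pvB_runTable_getD (review_years : List Int) (y : Int) :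
    (pvB_runTable (PySem.List.sorted (PySem.Set.ofList review_years) (fun x => x) false)).getD y 0
      = (pvStreak review_years y : Int) := by
  have := pvB_run_inv review_years
    (PySem.List.sorted (PySem.Set.ofList review_years) (fun x => x) false)
    PySem.Dict.empty
    (PySem.List.sorted_ofList_pairwise_lt review_years)
    (fun z hz => by
      have := (PySem.List.mem_sorted _ _ _ _).mp hz
      exact (PySem.Set.mem_ofList _ _).mp this)
    (fun z => by
      rw [PySem.Dict.getD_empty]
      by_cases hc : z ∈ review_years ∧ z ∉ PySem.List.sorted (PySem.Set.ofList review_years) (fun x => x) false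
      · exfalso
        exact hc.2 ((PySem.List.mem_sorted _ _ _ _).mpr ((PySem.Set.mem_ofList _ _).mpr hc.1))
      · rw [if_neg hc]) y
  rw [pvB_runTable, this]
  by_cases hy : y ∈ review_years
  · rw [if_pos hy]
  · rw [if_neg hy, pvStreak_of_not_mem _ _ hy]; rfl

-- A's inner continuity loop equals B's run-table test
lemma pv_cond_eq (review_years : List Int) (e k : Int) :
    pvA_inner review_years e (PySem.List.pyRange 0 k 1)
      = (decide (k ≤ 0) || decide ((pvStreak review_years e : Int) ≥ k)) := by
  by_cases hk : k ≤ 0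
  · have hnil : PySem.List.pyRange 0 k 1 = [] := by
      apply List.eq_nil_iff_forall_not_mem.mpr
      intro i hi
      have := PySem.List.mem_pyRange_one.mp hi
      omega
    rw [hnil]
    simp [pvA_inner, hk]
  · have hA : pvA_inner review_years e (PySem.List.pyRange 0 k 1) = true
        ↔ (k ≤ (pvStreak review_years e : Int)) := by
      rw [pvA_inner_iff]
      constructor
      · intro hall
        have hn : ∀ i : Nat, i < k.toNat → (e - i) ∈ review_years := by
          intro i hi
          exact hall i (PySem.List.mem_pyRange_one.mpr ⟨by omega, by omega⟩)
        have := (pvStreak_iff review_years k.toNat e).mp hn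
        omega
      · intro hle i hi
        have hmem := PySem.List.mem_pyRange_one.mp hi
        have := (pvStreak_iff review_years k.toNat e).mpr (by omega) i.toNat (by omega)
        have he : e - (↑i.toNat : Int) = e - i := by omega
        rwa [he] at this
    rw [Bool.eq_iff_iff]
    constructor
    · intro hb
      simp only [Bool.or_eq_true, decide_eq_true_eq]
      right
      exact ge_iff_le.mpr (hA.mp hb)
    · intro hb
      have h2 : k ≤ 0 ∨ (pvStreak review_years e : Int) ≥ k := by simpa using hb
      rcases h2 with h | h
      · exact absurd h hk
      · exact hA.mpr (ge_iff_le.mp h)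

lemma pv_set_contains (xs : List Int) (x : Int) :
    PySem.Set.contains (PySem.Set.ofList xs) x = xs.contains x := by
  by_cases h : x ∈ xs
  · have h1 : x ∈ PySem.Set.ofList xs := (PySem.Set.mem_ofList _ _).mpr h
    simp [PySem.Set.contains, h, h1]
  · have h1 : x ∉ PySem.Set.ofList xs := fun hc => h ((PySem.Set.mem_ofList _ _).mp hc)
    simp [PySem.Set.contains, h, h1]

-- ===== VERDICT (by name: the statement is the Claim_ definition above) =====
theorem get_eligible_years_spec : Claim_equal_get_eligible_years := by
  intro review_years entry_years observed_years continuity use_prior _ hpre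
  unfold Spec_get_eligible_years get_eligible_years get_eligible_years_alt
  cases continuity with
  | true =>
    simp only []
    apply PySem.List.foldl_congr_mem
    intro acc e _
    rw [pv_set_contains, pv_cond_eq, pvB_runTable_getD]
    by_cases hm : e + 1 ∈ entry_years <;> simp [hm] <;> split_ifs <;> tauto
  | false =>
    simp only []
    apply PySem.List.foldl_congr_mem
    intro acc e _
    rw [pv_set_contains, pv_set_contains]
    by_cases hm : e + 1 ∈ entry_years <;> simp [hm]
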